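-- pv_equiv track=rewrite | github.com/air55555/CoreSpecViewer | app/create_report/pdf_booklet.py | format_missing_boxes
-- ===== SOURCE A (Python) =====
-- def format_missing_boxes(present_boxes: list[int], first_box: int, last_box: int) -> str:
--     """Format missing boxes into compact range notation."""
--     if not present_boxes:
--         if first_box == last_box:
--             return f"{first_box} missing"
--         return f"{first_box}-{last_box} missing"
--
--     present_set = set(present_boxes)
--     missing = [n for n in range(first_box, last_box + 1) if n not in present_set]
--
--     if not missing:
--         return "All boxes present"
--
--     ranges = []
--     start = prev = None
--
--     for n in missing:
--         if start is None:
--             start = prev = n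
--         elif n == prev + 1:
--             prev = n
--         else:
--             ranges.append(f"{start}-{prev}" if start != prev else f"{start}")
--             start = prev = n
--
--     if start is not None:
--         ranges.append(f"{start}-{prev}" if start != prev else f"{start}")
--
--     return ", ".join(ranges) + " missing"
-- ===== SOURCE B (Python) =====
-- def format_missing_boxes(present_boxes: list[int], first_box: int, last_box: int) -> str:
--     """Format missing boxes into compact range notation (gap-walk over sorted present values)."""
--     if not present_boxes:
--         if first_box == last_box:
--             return f"{first_box} missing"
--         return f"{first_box}-{last_box} missing"
--
--     q = sorted({n for n in present_boxes if first_box <= n <= last_box})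
--
--     parts = []
--     lo = first_box
--     for p in q:
--         if lo <= p - 1:
--             parts.append(f"{lo}-{p-1}" if lo != p - 1 else f"{lo}")
--         lo = p + 1
--     if lo <= last_box:
--         parts.append(f"{lo}-{last_box}" if lo != last_box else f"{lo}")
--
--     if not parts:
--         return "All boxes present"
--     return ", ".join(parts) + " missing"
-- ===== Notes on version B (the rewrite author's own statement) =====
-- stated objective: faster
-- what changed: Instead of materialising every integer in [first_box, last_box] and regrouping the missing ones into runs, B sorts the distinct present values clipped to the range and emits each missing range directly from the gap before each present value (and after the last one).
import Mathlib
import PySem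

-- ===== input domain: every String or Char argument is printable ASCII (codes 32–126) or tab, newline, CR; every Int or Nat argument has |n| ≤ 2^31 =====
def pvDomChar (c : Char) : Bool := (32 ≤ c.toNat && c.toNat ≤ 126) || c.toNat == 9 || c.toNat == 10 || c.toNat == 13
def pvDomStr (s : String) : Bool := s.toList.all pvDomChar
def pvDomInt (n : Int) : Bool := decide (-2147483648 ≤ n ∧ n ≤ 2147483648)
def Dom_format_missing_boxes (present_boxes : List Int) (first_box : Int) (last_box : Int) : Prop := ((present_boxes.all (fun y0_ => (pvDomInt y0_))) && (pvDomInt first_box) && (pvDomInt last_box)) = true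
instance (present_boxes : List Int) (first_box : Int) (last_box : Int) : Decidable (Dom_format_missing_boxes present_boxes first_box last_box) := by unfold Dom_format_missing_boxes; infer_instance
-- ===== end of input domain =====

-- B replaces A's walk over every integer of [first_box, last_box] by a gap walk over the
-- sorted distinct present values clipped to the range (asymptotically less work when the
-- range is much larger than the list).

-- ===== PORT A =====
-- f"{start}-{prev}" if start != prev else f"{start}"
def renderA (s p : Int) : String :=
  if s ≠ p then PySem.Int.toStr s ++ "-" ++ PySem.Int.toStr p else PySem.Int.toStr s

-- the body of A's 'for n in missing' loop; state = (ranges, start, prev)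
def stepA (acc : List String × Option Int × Option Int) (n : Int) :
    List String × Option Int × Option Int :=
  match acc with
  | (ranges, none, _) => (ranges, some n, some n)
  | (ranges, some s, none) => (ranges, some s, none)   -- unreachable (prev is set with start)
  | (ranges, some s, some p) =>
    if n = p + 1 then (ranges, some s, some n)
    else (ranges ++ [renderA s p], some n, some n)

-- A's trailing 'if start is not None: ranges.append(...)'
def finishA (st : List String × Option Int × Option Int) : List String :=
  match st with
  | (rs, some s, some p) => rs ++ [renderA s p]
  | (rs, _, _) => rs

def format_missing_boxes (present_boxes : List Int) (first_box : Int) (last_box : Int) : String :=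
  if present_boxes = [] then
    if first_box = last_box then PySem.Int.toStr first_box ++ " missing"
    else PySem.Int.toStr first_box ++ "-" ++ PySem.Int.toStr last_box ++ " missing"
  else
    let present_set : PySem.Set Int := PySem.Set.ofList present_boxes
    let missing := (PySem.List.pyRange first_box (last_box + 1) 1).filter
      (fun n => !(PySem.Set.contains present_set n))
    if missing = [] then "All boxes present"
    else
      let st := missing.foldl stepA ([], none, none)
      let ranges : List String := finishA st
      PySem.Str.join ", " ranges ++ " missing"

-- ===== PORT B =====
-- the body of B's 'for p in q' loop; state = (parts, lo); the appended string is
-- f"{lo}-{p-1}" if lo != p - 1 else f"{lo}"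
def stepB (acc : List String × Int) (p : Int) : List String × Int :=
  ((if acc.2 ≤ p - 1 then
      acc.1 ++ [if acc.2 ≠ p - 1 then PySem.Int.toStr acc.2 ++ "-" ++ PySem.Int.toStr (p - 1)
                else PySem.Int.toStr acc.2]
    else acc.1), p + 1)

def format_missing_boxes_alt (present_boxes : List Int) (first_box : Int) (last_box : Int) : String :=
  if present_boxes = [] then
    if first_box = last_box then PySem.Int.toStr first_box ++ " missing"
    else PySem.Int.toStr first_box ++ "-" ++ PySem.Int.toStr last_box ++ " missing"
  else
    let q := PySem.List.sorted
      (PySem.Set.ofList (present_boxes.filter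
        (fun n => decide (first_box ≤ n) && decide (n ≤ last_box))))
      (fun x => x) false
    let st := q.foldl stepB ([], first_box)
    let parts : List String :=
      if st.2 ≤ last_box then
        st.1 ++ [if st.2 ≠ last_box then PySem.Int.toStr st.2 ++ "-" ++ PySem.Int.toStr last_box
                 else PySem.Int.toStr st.2]
      else st.1
    if parts = [] then "All boxes present"
    else PySem.Str.join ", " parts ++ " missing"

-- ===== PRECONDITION & SPEC =====
def Spec_format_missing_boxes (present_boxes : List Int) (first_box : Int) (last_box : Int) (out : String) : Prop := out = format_missing_boxes_alt present_boxes first_box last_box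
instance (present_boxes : List Int) (first_box : Int) (last_box : Int) (out : String) : Decidable (Spec_format_missing_boxes present_boxes first_box last_box out) := by unfold Spec_format_missing_boxes; infer_instance

-- ===== CLAIM (what is proved, stated in full; the proofs are below) =====
def Claim_equal_format_missing_boxes : Prop := ∀ (present_boxes : List Int) (first_box : Int) (last_box : Int), Dom_format_missing_boxes present_boxes first_box last_box → Spec_format_missing_boxes present_boxes first_box last_box (format_missing_boxes present_boxes first_box last_box)

-- ===== LEMMAS AND PROOFS =====

-- maximal consecutive runs (start, prev) of a strictly increasing list, seeded with (s, p)
def runs (s p : Int) : List Int → List (Int × Int)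
  | [] => [(s, p)]
  | n :: l => if n = p + 1 then runs s n l else (s, p) :: runs n n l

def runsTop : List Int → List (Int × Int)
  | [] => []
  | n :: l => runs n n l

-- the missing segments B's gap walk produces
def segs (lo last : Int) : List Int → List (Int × Int)
  | [] => if lo ≤ last then [(lo, last)] else []
  | q :: qs => (if lo ≤ q - 1 then [(lo, q - 1)] else []) ++ segs (q + 1) last qs

theorem runs_ne_nil (s p : Int) (l : List Int) : runs s p l ≠ [] := by
  induction l generalizing s p with
  | nil => simp [runs]
  | cons n l ih => simp only [runs]; split <;> simp [ih]

theorem runs_range (s : Int) (k : Nat) : ∀ (p b : Int), b = p + k →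
    ∀ l, runs s p (PySem.List.pyRange (p + 1) (b + 1) 1 ++ l) = runs s b l := by
  induction k with
  | zero => intro p b hb l; subst hb; simp [PySem.List.pyRange_one_eq_nil]
  | succ k ih =>
    intro p b hb l
    have h1 : (p : Int) + 1 < b + 1 := by omega
    rw [PySem.List.pyRange_one_cons h1]
    simp only [List.cons_append, runs]
    rw [if_pos trivial]
    have : b = (p + 1) + (k : Int) := by push_cast [hb]; ring
    exact ih (p + 1) b this l

theorem runsTop_block (lo p : Int) (hlo : lo ≤ p) (L : List Int) (hL : ∀ n ∈ L, p < n) :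
    runsTop (PySem.List.pyRange lo p 1 ++ L) =
      (if lo ≤ p - 1 then [(lo, p - 1)] else []) ++ runsTop L := by
  rcases lt_or_eq_of_le hlo with h | h
  · have hlp : lo ≤ p - 1 := by omega
    rw [PySem.List.pyRange_one_cons h, if_pos hlp]
    have hsplit : PySem.List.pyRange (lo + 1) p 1 = PySem.List.pyRange (lo + 1) ((p - 1) + 1) 1 := by
      norm_num
    simp only [List.cons_append, runsTop, hsplit]
    rw [runs_range lo (p - 1 - lo).toNat lo (p - 1) (by omega) L]
    cases L with
    | nil => simp [runs]
    | cons n l =>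
      have hnp : ¬ n = p := by have := hL n (by simp); omega
      simp [runs, hnp]
  · subst h
    rw [PySem.List.pyRange_one_eq_nil (le_refl _)]
    simp

theorem segs_eq (last : Int) : ∀ (q : List Int) (lo : Int), q.Pairwise (· < ·) →
    (∀ x ∈ q, lo ≤ x ∧ x ≤ last) →
    segs lo last q = runsTop ((PySem.List.pyRange lo (last + 1) 1).filter
      (fun n => !(q.contains n))) := by
  intro q
  induction q with
  | nil =>
    intro lo _ _
    simp only [segs, List.contains_nil, Bool.not_false, List.filter_true]
    by_cases h : lo ≤ last
    · rw [if_pos h, PySem.List.pyRange_one_cons (by omega)]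
      simp only [runsTop]
      have h2 := runs_range lo (last - lo).toNat lo last (by omega) []
      simp only [List.append_nil, runs] at h2
      exact h2.symm
    · rw [if_neg (by omega), PySem.List.pyRange_one_eq_nil (by omega)]
      simp [runsTop]
  | cons p qs ih =>
    intro lo hpair hmem
    have hp := hmem p (by simp)
    have hqs_gt : ∀ x ∈ qs, p < x := by
      intro x hx; exact (List.pairwise_cons.mp hpair).1 x hx
    have hsplit : PySem.List.pyRange lo (last + 1) 1 =
        PySem.List.pyRange lo p 1 ++ (p :: PySem.List.pyRange (p + 1) (last + 1) 1) := by
      rw [← PySem.List.pyRange_one_cons (by omega : p < last + 1)]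
      exact PySem.List.pyRange_one_append lo p (last + 1) hp.1 (by omega)
    rw [hsplit]
    have hfilter1 : (PySem.List.pyRange lo p 1).filter (fun n => !((p :: qs).contains n)) =
        PySem.List.pyRange lo p 1 := by
      apply List.filter_eq_self.mpr
      intro n hn
      have hn' := PySem.List.mem_pyRange_one.mp hn
      simp only [List.contains_cons, Bool.not_or, Bool.and_eq_true, Bool.not_eq_true']
      constructor
      · simp only [beq_eq_false_iff_ne]; omega
      · simp only [List.contains_eq_mem, decide_eq_false_iff_not]
        intro hmem'; have := hqs_gt n hmem'; omega
    have hp_drop : ((p :: PySem.List.pyRange (p + 1) (last + 1) 1).filter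
        (fun n => !((p :: qs).contains n))) =
        (PySem.List.pyRange (p + 1) (last + 1) 1).filter (fun n => !(qs.contains n)) := by
      simp only [List.filter_cons]
      rw [if_neg (by simp)]
      apply List.filter_congr
      intro n hn
      have hn' := PySem.List.mem_pyRange_one.mp hn
      simp
      omega
    rw [List.filter_append, hfilter1, hp_drop]
    rw [runsTop_block lo p hp.1 _ (by
      intro n hn
      have := PySem.List.mem_pyRange_one.mp (List.mem_of_mem_filter hn)
      omega)]
    simp only [segs]
    congr 1
    exact ih (p + 1) (List.pairwise_cons.mp hpair).2
      (fun x hx => ⟨by have := hqs_gt x hx; omega, (hmem x (by simp [hx])).2⟩)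

theorem foldA_runs (l : List Int) : ∀ (acc : List String) (s p : Int),
    finishA (l.foldl stepA (acc, some s, some p)) =
      acc ++ (runs s p l).map (fun r => renderA r.1 r.2) := by
  induction l with
  | nil => intro acc s p; simp [finishA, runs]
  | cons n l ih =>
    intro acc s p
    simp only [List.foldl_cons, stepA, runs]
    by_cases h : n = p + 1
    · rw [if_pos h, if_pos h, ih]
    · rw [if_neg h, if_neg h, ih]
      simp

-- B's loop + trailing append compute renderA over the segments
theorem foldB_segs (last : Int) (q : List Int) : ∀ (acc : List String) (lo : Int),
    (let st := q.foldl stepB (acc, lo);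
     if st.2 ≤ last then
       st.1 ++ [if st.2 ≠ last then PySem.Int.toStr st.2 ++ "-" ++ PySem.Int.toStr last
                else PySem.Int.toStr st.2]
     else st.1) =
      acc ++ (segs lo last q).map (fun r => renderA r.1 r.2) := by
  induction q with
  | nil =>
    intro acc lo
    simp only [List.foldl_nil, segs]
    split <;> simp_all [renderA]
  | cons p qs ih =>
    intro acc lo
    simp only [List.foldl_cons, stepB, segs]
    rw [ih]
    by_cases h : lo ≤ p - 1
    · simp [h, renderA]
    · simp [h]

-- ===== VERDICT (by name: the statement is the Claim_ definition above) =====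
theorem format_missing_boxes_spec : Claim_equal_format_missing_boxes := by
  intro present_boxes first_box last_box _
  unfold Spec_format_missing_boxes format_missing_boxes format_missing_boxes_alt
  by_cases hnil : present_boxes = []
  · simp [hnil]
  rw [if_neg hnil, if_neg hnil]
  -- name the two derived lists
  set q := PySem.List.sorted
      (PySem.Set.ofList (present_boxes.filter
        (fun n => decide (first_box ≤ n) && decide (n ≤ last_box))))
      (fun x => x) false with hq
  have hq_pair : q.Pairwise (· < ·) := PySem.List.sorted_ofList_pairwise_lt _
  have hq_mem_iff : ∀ x, x ∈ q ↔ (x ∈ present_boxes ∧ first_box ≤ x ∧ x ≤ last_box) := by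
    intro x
    rw [hq, PySem.List.mem_sorted, PySem.Set.mem_ofList, List.mem_filter]
    simp
  have hq_bounds : ∀ x ∈ q, first_box ≤ x ∧ x ≤ last_box := by
    intro x hx; exact ((hq_mem_iff x).mp hx).2
  -- A's missing list filters the same elements as q's complement within the range
  have hfilter : (PySem.List.pyRange first_box (last_box + 1) 1).filter
      (fun n => !(PySem.Set.contains (PySem.Set.ofList present_boxes) n)) =
      (PySem.List.pyRange first_box (last_box + 1) 1).filter (fun n => !(q.contains n)) := by
    apply List.filter_congr
    intro n hn
    have hn' := PySem.List.mem_pyRange_one.mp hn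
    have : (PySem.Set.contains (PySem.Set.ofList present_boxes) n) = (q.contains n) := by
      simp only [PySem.Set.contains_eq_listContains, List.contains_eq_mem]
      by_cases hmem : n ∈ present_boxes
      · have : n ∈ q := (hq_mem_iff n).mpr ⟨hmem, by omega, by omega⟩
        simp [hmem, PySem.Set.mem_ofList, this]
      · have : n ∉ q := fun h => hmem ((hq_mem_iff n).mp h).1
        simp [hmem, PySem.Set.mem_ofList, this]
    rw [this]
  set missing := (PySem.List.pyRange first_box (last_box + 1) 1).filter
      (fun n => !(q.contains n)) with hmissing
  have hsegs : segs first_box last_box q = runsTop missing :=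
    segs_eq last_box q first_box hq_pair hq_bounds
  have hparts : (let st := q.foldl stepB ([], first_box);
      if st.2 ≤ last_box then
        st.1 ++ [if st.2 ≠ last_box then PySem.Int.toStr st.2 ++ "-" ++ PySem.Int.toStr last_box
                 else PySem.Int.toStr st.2]
      else st.1) =
      (runsTop missing).map (fun r => renderA r.1 r.2) := by
    rw [foldB_segs, hsegs]; simp
  simp only [hfilter]
  simp only [hparts]
  cases hm : missing with
  | nil =>
    simp [runsTop]
  | cons m ms =>
    rw [if_neg (by simp)]
    have hmapne : ((runsTop (m :: ms)).map (fun r => renderA r.1 r.2)) ≠ [] := by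
      simp [runsTop, runs_ne_nil]
    rw [if_neg hmapne]
    have hA : finishA ((m :: ms).foldl stepA ([], none, none)) =
        (runsTop (m :: ms)).map (fun r => renderA r.1 r.2) := by
      simp only [List.foldl_cons, stepA, runsTop]
      exact foldA_runs ms [] m m
    rw [hA]
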